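-- pv_equiv track=rewrite | github.com/Hbrauveres/MMS | AlocacaoDinamica.py | encontra_slots_livres
-- ===== SOURCE A (Python) =====
-- def encontra_slots_livres(memoria, tam_memoria, tam_processo):
--     count = 0
--     slots_livres = []
--     endereco_inicio = 0
--
--     for i in range(0,tam_memoria):
--         if memoria[i] == '-':
--             if count == 0:
--                 endereco_inicio = i
--
--             count += 1
--
--             if(i == tam_memoria - 1) and (count >= tam_processo):
--                 slots_livres.append([endereco_inicio,count])
--
--         elif memoria[i] != '-':
--             if(count != 0) and (count >= tam_processo):
--                 slots_livres.append([endereco_inicio,count])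
--             count = 0
--
--     return(slots_livres)
-- ===== SOURCE B (Python) =====
-- def encontra_slots_livres(memoria, tam_memoria, tam_processo):
--     n = max(tam_memoria, 0)
--     cells = [memoria[i] for i in range(tam_memoria)]
--     bounds = [i for i in range(n) if i == 0 or cells[i] != cells[i - 1]] + [n]
--     return [[s, e - s]
--             for s, e in zip(bounds, bounds[1:])
--             if cells[s] == '-' and e - s >= tam_processo]
-- ===== Notes on version B (the rewrite author's own statement) =====
-- stated objective: alternative
-- what changed: Replaces A's single stateful scan (carried count/endereco_inicio with flush points and an end-of-memory special case) by three staged passes: materialise the first tam_memoria cells, compute run-boundary indices by pairwise comparison, zip consecutive boundaries into (start,end) runs, and keep the '-' runs of sufficient length via a filtering comprehension.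
import Mathlib
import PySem

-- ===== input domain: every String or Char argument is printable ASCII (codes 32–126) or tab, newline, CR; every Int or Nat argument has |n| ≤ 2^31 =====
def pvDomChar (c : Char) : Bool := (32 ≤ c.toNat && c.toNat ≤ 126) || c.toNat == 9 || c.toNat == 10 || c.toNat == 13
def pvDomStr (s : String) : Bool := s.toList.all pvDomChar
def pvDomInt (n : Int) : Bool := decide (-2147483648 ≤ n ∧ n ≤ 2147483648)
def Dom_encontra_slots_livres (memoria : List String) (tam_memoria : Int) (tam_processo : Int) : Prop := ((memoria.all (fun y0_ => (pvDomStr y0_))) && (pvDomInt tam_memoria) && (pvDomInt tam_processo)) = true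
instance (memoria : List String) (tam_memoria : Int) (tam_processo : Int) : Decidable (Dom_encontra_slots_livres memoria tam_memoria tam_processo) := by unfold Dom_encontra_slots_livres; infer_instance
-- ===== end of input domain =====

-- B replaces A's carried counter/start-address state machine by staged passes: cells, boundary indices, zip into runs, filter (objective: alternative).

-- ===== PORT A =====
-- loop body of A's for-loop; state = (count, slots_livres, endereco_inicio)
def pvAStep (tam_memoria tam_processo : Int) (memoria : List String)
    (st : Int × List (List Int) × Int) (i : Int) : Int × List (List Int) × Int :=
  match PySem.List.pyGet? memoria i with
  | none => st  -- IndexError in Python; excluded by Pre_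
  | some c =>
    if c = "-" then
      let inicio := if st.1 = 0 then i else st.2.2
      let count := st.1 + 1
      let slots := if i = tam_memoria - 1 ∧ tam_processo ≤ count then st.2.1 ++ [[inicio, count]] else st.2.1
      (count, slots, inicio)
    else
      let slots := if st.1 ≠ 0 ∧ tam_processo ≤ st.1 then st.2.1 ++ [[st.2.2, st.1]] else st.2.1
      (0, slots, st.2.2)

def encontra_slots_livres (memoria : List String) (tam_memoria : Int) (tam_processo : Int) : List (List Int) :=
  ((PySem.List.pyRange 0 tam_memoria 1).foldl (pvAStep tam_memoria tam_processo memoria) (0, [], 0)).2.1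

-- ===== PORT B =====
-- cells = [memoria[i] for i in range(tam_memoria)]  (pyGetD: inside Pre_ every index is in range; Python raises where it is not)
def pvCells (memoria : List String) (tam_memoria : Int) : List String :=
  (PySem.List.pyRange 0 tam_memoria 1).map (fun i => PySem.List.pyGetD memoria i "")

-- the boundary predicate of B's comprehension: i == 0 or cells[i] != cells[i-1]
def pvIsB (cells : List String) (i : Int) : Bool :=
  i == 0 || (PySem.List.pyGetD cells i "" != PySem.List.pyGetD cells (i-1) "")

-- the body of B's final comprehension over one (s, e) pair
def pvF (cells : List String) (tam_processo : Int) (p : Int × Int) : Option (List Int) :=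
  if PySem.List.pyGetD cells p.1 "" = "-" ∧ tam_processo ≤ p.2 - p.1 then some [p.1, p.2 - p.1] else none

def encontra_slots_livres_alt (memoria : List String) (tam_memoria : Int) (tam_processo : Int) : List (List Int) :=
  let n := max tam_memoria 0
  let cells := pvCells memoria tam_memoria
  let bounds := ((PySem.List.pyRange 0 n 1).filter (pvIsB cells)) ++ [n]
  (bounds.zip bounds.tail).filterMap (pvF cells tam_processo)

-- ===== PRECONDITION & SPEC =====
-- Pre_ excludes exactly the inputs where Python A raises IndexError: tam_memoria > len(memoria) with a positive tam_memoria.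
def Pre_encontra_slots_livres (memoria : List String) (tam_memoria : Int) (tam_processo : Int) : Prop :=
  tam_memoria ≤ (memoria.length : Int) ∨ tam_memoria ≤ 0

instance (memoria : List String) (tam_memoria : Int) (tam_processo : Int) : Decidable (Pre_encontra_slots_livres memoria tam_memoria tam_processo) := by unfold Pre_encontra_slots_livres; infer_instance

def pvWitness_encontra_slots_livres : List String × Int × Int := (["-", "P", "-", "-"], 4, 1)

def Spec_encontra_slots_livres (memoria : List String) (tam_memoria : Int) (tam_processo : Int) (out : List (List Int)) : Prop := out = encontra_slots_livres_alt memoria tam_memoria tam_processo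
instance (memoria : List String) (tam_memoria : Int) (tam_processo : Int) (out : List (List Int)) : Decidable (Spec_encontra_slots_livres memoria tam_memoria tam_processo out) := by unfold Spec_encontra_slots_livres; infer_instance

-- ===== CLAIM (what is proved, stated in full; the proofs are below) =====
def Claim_equal_encontra_slots_livres : Prop := ∀ (memoria : List String) (tam_memoria : Int) (tam_processo : Int), Dom_encontra_slots_livres memoria tam_memoria tam_processo → Pre_encontra_slots_livres memoria tam_memoria tam_processo → Spec_encontra_slots_livres memoria tam_memoria tam_processo (encontra_slots_livres memoria tam_memoria tam_processo)

-- ===== LEMMAS AND PROOFS =====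

-- Proof-only intermediate: a two-pointer run scanner. We show A's fold equals it (pvL) and
-- that it equals B's bounds/zip/filter pipeline (pvMain).

-- skip to the end of the '-' run starting at j (fuel bounds iteration)
def pvRun (memoria : List String) (tam_memoria : Int) (j : Int) : Nat → Int
  | 0 => j
  | fuel+1 =>
    if j < tam_memoria ∧ PySem.List.pyGet? memoria j = some "-" then
      pvRun memoria tam_memoria (j+1) fuel
    else j

def pvLoop (memoria : List String) (tam_memoria tam_processo : Int) (i : Int) : Nat → List (List Int)
  | 0 => []
  | fuel+1 =>
    if i < tam_memoria then
      if PySem.List.pyGet? memoria i = some "-" then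
        let j := pvRun memoria tam_memoria i (tam_memoria - i).toNat
        (if tam_processo ≤ j - i then [[i, j - i]] else []) ++ pvLoop memoria tam_memoria tam_processo j fuel
      else pvLoop memoria tam_memoria tam_processo (i+1) fuel
    else []

-- consecutive pairs of a list (= l.zip l.tail)
def pvPairs : List Int → List (Int × Int)
  | a :: b :: rest => (a, b) :: pvPairs (b :: rest)
  | _ => []

theorem pvZip_eq : ∀ l : List Int, l.zip l.tail = pvPairs l
  | [] => rfl
  | [_] => rfl
  | a :: b :: r => by
      have ih := pvZip_eq (b :: r)
      simpa [pvPairs, List.zip_cons_cons] using ih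

-- the suffix of B's bounds list from position i
def pvTB (cells : List String) (tam_memoria i : Int) : List Int :=
  ((PySem.List.pyRange i tam_memoria 1).filter (pvIsB cells)) ++ [tam_memoria]

theorem pvRun_bounds (memoria : List String) (tm : Int) :
    ∀ (fuel : Nat) (j : Int), j ≤ tm → j ≤ pvRun memoria tm j fuel ∧ pvRun memoria tm j fuel ≤ tm := by
  intro fuel
  induction fuel with
  | zero => intro j hj; simp [pvRun]; exact hj
  | succ f ih =>
    intro j hj
    simp only [pvRun]
    split
    · rename_i h
      have := ih (j+1) (by omega)
      omega
    · exact ⟨le_refl _, hj⟩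

theorem pvRun_stop (memoria : List String) (tm : Int) :
    ∀ (fuel : Nat) (j : Int), tm - j ≤ (fuel : Int) →
      pvRun memoria tm j fuel < tm →
      PySem.List.pyGet? memoria (pvRun memoria tm j fuel) ≠ some "-" := by
  intro fuel
  induction fuel with
  | zero => intro j hf hlt; simp [pvRun] at hlt ⊢; omega
  | succ f ih =>
    intro j hf hlt
    by_cases h : j < tm ∧ PySem.List.pyGet? memoria j = some "-"
    · have hr : pvRun memoria tm j (f+1) = pvRun memoria tm (j+1) f := by
        simp only [pvRun]; rw [if_pos h]
      rw [hr] at hlt ⊢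
      exact ih (j+1) (by push_cast at hf ⊢; omega) hlt
    · have hr : pvRun memoria tm j (f+1) = j := by
        simp only [pvRun]; rw [if_neg h]
      rw [hr] at hlt ⊢
      intro hc
      exact h ⟨hlt, hc⟩

-- every position strictly before the run's end holds '-'
theorem pvRun_dash (memoria : List String) (tm : Int) :
    ∀ (fuel : Nat) (j k : Int), j ≤ k → k < pvRun memoria tm j fuel →
      PySem.List.pyGet? memoria k = some "-" := by
  intro fuel
  induction fuel with
  | zero => intro j k hjk hk; simp [pvRun] at hk; omega
  | succ f ih =>
    intro j k hjk hk
    by_cases h : j < tm ∧ PySem.List.pyGet? memoria j = some "-"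
    · have hr : pvRun memoria tm j (f+1) = pvRun memoria tm (j+1) f := by
        simp only [pvRun]; rw [if_pos h]
      rw [hr] at hk
      by_cases hkj : k = j
      · rw [hkj]; exact h.2
      · exact ih (j+1) k (by omega) hk
    · have hr : pvRun memoria tm j (f+1) = j := by
        simp only [pvRun]; rw [if_neg h]
      rw [hr] at hk; omega

-- runEnd i skips its own first position when it is '-'
theorem pvRun_cons (memoria : List String) (tm i : Int) (hi : i < tm)
    (hc : PySem.List.pyGet? memoria i = some "-") :
    pvRun memoria tm i (tm - i).toNat = pvRun memoria tm (i+1) (tm - (i+1)).toNat := by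
  have h1 : (tm - i).toNat = (tm - (i+1)).toNat + 1 := by omega
  rw [h1]
  simp only [pvRun]
  rw [if_pos ⟨hi, hc⟩]

theorem pvRun_id (memoria : List String) (tm i : Int)
    (h : ¬ (i < tm ∧ PySem.List.pyGet? memoria i = some "-")) :
    ∀ fuel, pvRun memoria tm i fuel = i := by
  intro fuel
  cases fuel with
  | zero => simp [pvRun]
  | succ f => simp only [pvRun]; rw [if_neg h]

theorem pvLoop_stop (memoria : List String) (tm tp i : Int) (h : tm ≤ i) :
    ∀ fuel, pvLoop memoria tm tp i fuel = [] := by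
  intro fuel
  cases fuel with
  | zero => simp [pvLoop]
  | succ f => simp only [pvLoop]; rw [if_neg (by omega)]

-- A's fold from position i while inside a run (count = c ≥ 1, run start recorded as s)
theorem pvR (memoria : List String) (tm tp : Int) (hlen : tm ≤ (memoria.length : Int)) :
    ∀ (n : Nat) (i : Int), (tm - i).toNat ≤ n → 0 ≤ i → i < tm →
    ∀ (c s : Int) (slots : List (List Int)), 1 ≤ c →
    ((PySem.List.pyRange i tm 1).foldl (pvAStep tm tp memoria) (c, slots, s)).2.1 =
      (let j := pvRun memoria tm i (tm - i).toNat
       let slots' := if tp ≤ c + (j - i) then slots ++ [[s, c + (j - i)]] else slots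
       if j < tm then ((PySem.List.pyRange (j+1) tm 1).foldl (pvAStep tm tp memoria) (0, slots', s)).2.1 else slots') := by
  intro n
  induction n with
  | zero => intro i hn h0 hi; omega
  | succ n ih =>
    intro i hn h0 hi c s slots hc
    have hget : PySem.List.pyGet? memoria i = some (memoria[i.toNat]'(by omega)) :=
      PySem.List.pyGet?_eq_some_getElem memoria h0 (by omega)
    rw [PySem.List.pyRange_one_cons hi, List.foldl_cons]
    by_cases hdash : memoria[i.toNat]'(by omega) = "-"
    · have hstep : pvAStep tm tp memoria (c, slots, s) i =
          (c + 1, (if i = tm - 1 ∧ tp ≤ c + 1 then slots ++ [[s, c + 1]] else slots), s) := by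
        simp [pvAStep, hget, hdash, (show ¬ c = 0 by omega)]
      rw [hstep]
      have hj : pvRun memoria tm i (tm - i).toNat = pvRun memoria tm (i+1) (tm - (i+1)).toNat :=
        pvRun_cons memoria tm i hi (by rw [hget, hdash])
      by_cases hend : i + 1 = tm
      · have hJ : pvRun memoria tm i (tm - i).toNat = tm := by
          rw [hj]
          have h2 : (tm - (i+1)).toNat = 0 := by omega
          rw [h2]
          simp only [pvRun]
          omega
        rw [PySem.List.pyRange_one_eq_nil (by omega), List.foldl_nil]
        simp only [hJ]
        rw [if_neg (lt_irrefl tm)]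
        have e1 : c + (tm - i) = c + 1 := by omega
        rw [e1]
        have hiff : (i = tm - 1 ∧ tp ≤ c + 1) ↔ (tp ≤ c + 1) :=
          ⟨fun h => h.2, fun h => ⟨by omega, h⟩⟩
        simp only [hiff]
      · have hiff : (i = tm - 1 ∧ tp ≤ c + 1) ↔ False :=
          ⟨fun h => hend (by omega), False.elim⟩
        simp only [hiff, if_false]
        rw [ih (i+1) (by omega) (by omega) (by omega) (c+1) s slots (by omega)]
        simp only [hj]
        have harith : ∀ j : Int, c + 1 + (j - (i + 1)) = c + (j - i) := by intro j; ring
        rw [harith]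
    · have hne : PySem.List.pyGet? memoria i ≠ some "-" := by
        rw [hget]; intro h; exact hdash (by injection h)
      have hstep : pvAStep tm tp memoria (c, slots, s) i =
          (0, (if tp ≤ c then slots ++ [[s, c]] else slots), s) := by
        simp [pvAStep, hget, hdash, (show ¬ c = 0 by omega)]
      rw [hstep]
      have hj : pvRun memoria tm i (tm - i).toNat = i :=
        pvRun_id memoria tm i (by intro h; exact hne h.2) _
      simp only [hj]
      rw [if_pos hi]
      have e1 : c + (i - i) = c := by ring
      rw [e1]

-- A's fold from position i with count = 0 equals slots ++ the run scanner from i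
theorem pvL (memoria : List String) (tm tp : Int) (hlen : tm ≤ (memoria.length : Int)) :
    ∀ (n : Nat) (i : Int), (tm - i).toNat ≤ n → 0 ≤ i →
    ∀ (fuel : Nat), tm - i ≤ (fuel : Int) →
    ∀ (slots : List (List Int)) (s : Int),
    ((PySem.List.pyRange i tm 1).foldl (pvAStep tm tp memoria) (0, slots, s)).2.1 =
      slots ++ pvLoop memoria tm tp i fuel := by
  intro n
  induction n with
  | zero =>
    intro i hn h0 fuel hfuel slots s
    have hi : tm ≤ i := by omega
    rw [PySem.List.pyRange_one_eq_nil hi, List.foldl_nil, pvLoop_stop memoria tm tp i hi]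
    simp
  | succ n ih =>
    intro i hn h0 fuel hfuel slots s
    by_cases hi : i < tm
    · have hget : PySem.List.pyGet? memoria i = some (memoria[i.toNat]'(by omega)) :=
        PySem.List.pyGet?_eq_some_getElem memoria h0 (by omega)
      have hf0 : fuel ≠ 0 := by
        intro hz; rw [hz] at hfuel; push_cast at hfuel; omega
      obtain ⟨f, rfl⟩ := Nat.exists_eq_succ_of_ne_zero hf0
      rw [PySem.List.pyRange_one_cons hi, List.foldl_cons]
      by_cases hdash : memoria[i.toNat]'(by omega) = "-"
      · have hgd : PySem.List.pyGet? memoria i = some "-" := by rw [hget, hdash]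
        have hstep : pvAStep tm tp memoria (0, slots, s) i =
            (1, (if i = tm - 1 ∧ tp ≤ (1:Int) then slots ++ [[i, 1]] else slots), i) := by
          simp [pvAStep, hget, hdash]
        rw [hstep]
        have hBstep : pvLoop memoria tm tp i (f + 1) =
            (if tp ≤ pvRun memoria tm i (tm - i).toNat - i
             then [[i, pvRun memoria tm i (tm - i).toNat - i]] else []) ++
            pvLoop memoria tm tp (pvRun memoria tm i (tm - i).toNat) f := by
          simp only [pvLoop]
          rw [if_pos hi, if_pos hgd]
        rw [hBstep]
        have hjrw : pvRun memoria tm i (tm - i).toNat = pvRun memoria tm (i+1) (tm - (i+1)).toNat :=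
          pvRun_cons memoria tm i hi hgd
        by_cases hend : i + 1 = tm
        · have hJ : pvRun memoria tm i (tm - i).toNat = tm := by
            rw [hjrw]
            have h2 : (tm - (i+1)).toNat = 0 := by omega
            rw [h2]
            simp only [pvRun]
            omega
          rw [PySem.List.pyRange_one_eq_nil (by omega), List.foldl_nil]
          rw [hJ, pvLoop_stop memoria tm tp tm (le_refl tm), List.append_nil]
          have e1 : tm - i = (1:Int) := by omega
          rw [e1]
          have hiff : (i = tm - 1 ∧ tp ≤ (1:Int)) ↔ (tp ≤ (1:Int)) :=
            ⟨fun h => h.2, fun h => ⟨by omega, h⟩⟩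
          simp only [hiff]
          by_cases htp : tp ≤ (1:Int)
          · rw [if_pos htp, if_pos htp]
          · rw [if_neg htp, if_neg htp]; simp
        · have hiff : (i = tm - 1 ∧ tp ≤ (1:Int)) ↔ False :=
            ⟨fun h => hend (by omega), False.elim⟩
          simp only [hiff, if_false]
          rw [pvR memoria tm tp hlen n (i+1) (by omega) (by omega) (by omega) 1 i slots (le_refl _)]
          simp only [hjrw]
          set j := pvRun memoria tm (i+1) (tm - (i+1)).toNat with hjdef
          have hjb := pvRun_bounds memoria tm (tm - (i+1)).toNat (i+1) (by omega)
          rw [← hjdef] at hjb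
          have harith : 1 + (j - (i + 1)) = j - i := by ring
          rw [harith]
          by_cases hjlt : j < tm
          · rw [if_pos hjlt]
            have hjne : PySem.List.pyGet? memoria j ≠ some "-" := by
              have hs := pvRun_stop memoria tm (tm - (i+1)).toNat (i+1) (by omega)
              rw [← hjdef] at hs
              exact hs hjlt
            have hf1 : f ≠ 0 := by
              intro hz; rw [hz] at hfuel; push_cast at hfuel; omega
            obtain ⟨f', rfl⟩ := Nat.exists_eq_succ_of_ne_zero hf1
            have hBj : pvLoop memoria tm tp j (f' + 1) = pvLoop memoria tm tp (j+1) f' := by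
              simp only [pvLoop]
              rw [if_pos hjlt, if_neg hjne]
            rw [hBj]
            rw [ih (j+1) (by omega) (by omega) f' (by push_cast at hfuel ⊢; omega)]
            by_cases htp : tp ≤ j - i
            · rw [if_pos htp, if_pos htp]; simp
            · rw [if_neg htp, if_neg htp]; simp
          · rw [if_neg hjlt]
            rw [pvLoop_stop memoria tm tp j (by omega), List.append_nil]
            by_cases htp : tp ≤ j - i
            · rw [if_pos htp, if_pos htp]
            · rw [if_neg htp, if_neg htp]; simp
      · have hne : PySem.List.pyGet? memoria i ≠ some "-" := by
          rw [hget]; intro h; exact hdash (by injection h)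
        have hstep : pvAStep tm tp memoria (0, slots, s) i = (0, slots, s) := by
          simp [pvAStep, hget, hdash]
        rw [hstep]
        have hB : pvLoop memoria tm tp i (f + 1) = pvLoop memoria tm tp (i+1) f := by
          simp only [pvLoop]
          rw [if_pos hi, if_neg hne]
        rw [hB]
        exact ih (i+1) (by omega) (by omega) f (by push_cast at hfuel ⊢; omega) slots s
    · rw [PySem.List.pyRange_one_eq_nil (by omega), List.foldl_nil,
        pvLoop_stop memoria tm tp i (by omega)]
      simp

-- cells[i] agrees with memoria[i] on in-range indices
theorem pvCells_get (memoria : List String) (tm : Int) (i : Int) (h0 : 0 ≤ i) (hi : i < tm) :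
    PySem.List.pyGetD (pvCells memoria tm) i "" = PySem.List.pyGetD memoria i "" := by
  unfold pvCells
  exact PySem.List.pyGetD_map_pyRange_of_nonneg _ tm i "" h0 hi

theorem pvMemGet (memoria : List String) (tm : Int) (hlen : tm ≤ (memoria.length : Int))
    (i : Int) (h0 : 0 ≤ i) (hi : i < tm) :
    PySem.List.pyGet? memoria i = some (PySem.List.pyGetD (pvCells memoria tm) i "") := by
  rw [pvCells_get memoria tm i h0 hi]
  rw [PySem.List.pyGet?_eq_some_getElem memoria h0 (by omega),
    PySem.List.pyGetD_eq_getElem memoria "" h0 (by omega)]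

-- pvTB is headed: it always ends with tm
theorem pvTB_shape (cells : List String) (tm i : Int) :
    ∃ h t, pvTB cells tm i = h :: t := by
  unfold pvTB
  cases hfl : (PySem.List.pyRange i tm 1).filter (pvIsB cells) with
  | nil => exact ⟨tm, [], rfl⟩
  | cons a l => exact ⟨a, l ++ [tm], rfl⟩

theorem pvPairs_cons (x h : Int) (t : List Int) :
    pvPairs (x :: h :: t) = (x, h) :: pvPairs (h :: t) := rfl

-- positions strictly inside a '-' run are not boundaries: bounds of [k, tm) = bounds of [j, tm)
theorem pvSkip (memoria : List String) (tm : Int) (hlen : tm ≤ (memoria.length : Int))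
    (i j : Int) (h0 : 0 ≤ i) (hjtm : j ≤ tm)
    (hdash : ∀ m, i ≤ m → m < j → PySem.List.pyGet? memoria m = some "-") :
    ∀ (d : Nat) (k : Int), (j - k).toNat ≤ d → i < k → k ≤ j →
    (PySem.List.pyRange k tm 1).filter (pvIsB (pvCells memoria tm)) =
      (PySem.List.pyRange j tm 1).filter (pvIsB (pvCells memoria tm)) := by
  intro d
  induction d with
  | zero =>
    intro k hd hik hkj
    have : k = j := by omega
    rw [this]
  | succ d ih =>
    intro k hd hik hkj
    by_cases hkj' : k = j
    · rw [hkj']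
    · have hk : k < j := by omega
      rw [PySem.List.pyRange_one_cons (by omega), List.filter_cons]
      have hck : PySem.List.pyGetD (pvCells memoria tm) k "" = "-" := by
        have := pvMemGet memoria tm hlen k (by omega) (by omega)
        rw [hdash k (by omega) hk] at this
        exact (Option.some_injective _ this.symm)
      have hck1 : PySem.List.pyGetD (pvCells memoria tm) (k-1) "" = "-" := by
        have := pvMemGet memoria tm hlen (k-1) (by omega) (by omega)
        rw [hdash (k-1) (by omega) (by omega)] at this
        exact (Option.some_injective _ this.symm)
      have hb : pvIsB (pvCells memoria tm) k = false := by
        unfold pvIsB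
        rw [hck, hck1]
        simp
        omega
      rw [hb]
      simp only [Bool.false_eq_true, if_false]
      exact ih (k+1) (by omega) (by omega) (by omega)

-- if j is a run end (dash before, non-dash or tm at j, 1 ≤ j) then pvTB at j starts with j
theorem pvTB_head (memoria : List String) (tm : Int) (hlen : tm ≤ (memoria.length : Int))
    (j : Int) (h1 : 1 ≤ j) (hjtm : j ≤ tm)
    (hprev : PySem.List.pyGet? memoria (j-1) = some "-")
    (hat : j = tm ∨ PySem.List.pyGet? memoria j ≠ some "-") :
    ∃ t, pvTB (pvCells memoria tm) tm j = j :: t := by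
  by_cases hj : j = tm
  · refine ⟨[], ?_⟩
    unfold pvTB
    rw [hj, PySem.List.pyRange_one_eq_nil (le_refl tm)]
    rfl
  · have hjlt : j < tm := by omega
    have hne : PySem.List.pyGet? memoria j ≠ some "-" := by
      cases hat with
      | inl h => exact absurd h hj
      | inr h => exact h
    have hcp : PySem.List.pyGetD (pvCells memoria tm) (j-1) "" = "-" := by
      have := pvMemGet memoria tm hlen (j-1) (by omega) (by omega)
      rw [hprev] at this
      exact (Option.some_injective _ this.symm)
    have hcj : PySem.List.pyGetD (pvCells memoria tm) j "" ≠ "-" := by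
      intro hc
      apply hne
      rw [pvMemGet memoria tm hlen j (by omega) hjlt, hc]
    have hb : pvIsB (pvCells memoria tm) j = true := by
      unfold pvIsB
      simp only [Bool.or_eq_true, beq_iff_eq, bne_iff_ne, ne_eq]
      right
      rw [hcp]
      exact hcj
    refine ⟨((PySem.List.pyRange (j+1) tm 1).filter (pvIsB (pvCells memoria tm))) ++ [tm], ?_⟩
    unfold pvTB
    rw [PySem.List.pyRange_one_cons hjlt, List.filter_cons, hb]
    simp

-- MAIN BRIDGE: the run scanner equals B's filterMap over consecutive boundary pairs
theorem pvMain (memoria : List String) (tm tp : Int) (hlen : tm ≤ (memoria.length : Int)) :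
    ∀ (fuel : Nat) (i : Int), tm - i ≤ (fuel : Int) → 0 ≤ i → i ≤ tm →
    (i = tm ∨ PySem.List.pyGet? memoria i ≠ some "-" ∨ pvIsB (pvCells memoria tm) i = true) →
    pvLoop memoria tm tp i fuel =
      List.filterMap (pvF (pvCells memoria tm) tp) (pvPairs (pvTB (pvCells memoria tm) tm i)) := by
  intro fuel
  induction fuel with
  | zero =>
    intro i hf h0 hitm _
    have : i = tm := by push_cast at hf; omega
    rw [this]
    unfold pvTB
    rw [PySem.List.pyRange_one_eq_nil (le_refl tm)]
    simp [pvLoop, pvPairs]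
  | succ f ih =>
    intro i hf h0 hitm hvalid
    by_cases hi : i < tm
    · by_cases hdash : PySem.List.pyGet? memoria i = some "-"
      · -- i starts a '-' run; it is a boundary
        have hb : pvIsB (pvCells memoria tm) i = true := by
          rcases hvalid with h | h | h
          · omega
          · exact absurd hdash h
          · exact h
        set j := pvRun memoria tm i (tm - i).toNat with hjdef
        have hjrw : j = pvRun memoria tm (i+1) (tm - (i+1)).toNat := by
          rw [hjdef]; exact pvRun_cons memoria tm i hi hdash
        have hjb : i + 1 ≤ j ∧ j ≤ tm := by
          rw [hjrw]; exact pvRun_bounds memoria tm _ (i+1) (by omega)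
        have hdall : ∀ m, i ≤ m → m < j → PySem.List.pyGet? memoria m = some "-" := by
          intro m hm1 hm2
          by_cases hmi : m = i
          · rw [hmi]; exact hdash
          · rw [hjrw] at hm2
            exact pvRun_dash memoria tm _ (i+1) m (by omega) hm2
        have hjstop : j = tm ∨ PySem.List.pyGet? memoria j ≠ some "-" := by
          by_cases hjtm : j < tm
          · right
            rw [hjrw]
            exact pvRun_stop memoria tm _ (i+1) (by omega) (by rw [← hjrw]; exact hjtm)
          · left; omega
        -- pvTB i = i :: pvTB j
        obtain ⟨t, ht⟩ := pvTB_head memoria tm hlen j (by omega) hjb.2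
          (hdall (j-1) (by omega) (by omega)) hjstop
        have hTB : pvTB (pvCells memoria tm) tm i = i :: j :: t := by
          unfold pvTB
          rw [PySem.List.pyRange_one_cons hi, List.filter_cons, hb]
          simp only [if_pos trivial]
          have hskip : (PySem.List.pyRange (i+1) tm 1).filter (pvIsB (pvCells memoria tm)) =
              (PySem.List.pyRange j tm 1).filter (pvIsB (pvCells memoria tm)) :=
            pvSkip memoria tm hlen i j h0 hjb.2 hdall (j - (i+1)).toNat (i+1) (le_refl _)
              (by omega) (by omega)
          rw [hskip]
          have : (PySem.List.pyRange j tm 1).filter (pvIsB (pvCells memoria tm)) ++ [tm] =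
              j :: t := ht
          rw [List.cons_append, this]
        have hLoop : pvLoop memoria tm tp i (f + 1) =
            (if tp ≤ j - i then [[i, j - i]] else []) ++ pvLoop memoria tm tp j f := by
          simp only [pvLoop]
          rw [if_pos hi, if_pos hdash, ← hjdef]
        rw [hLoop, hTB, pvPairs_cons, List.filterMap_cons]
        have hci : PySem.List.pyGetD (pvCells memoria tm) i "" = "-" := by
          have := pvMemGet memoria tm hlen i h0 hi
          rw [hdash] at this
          exact (Option.some_injective _ this.symm)
        have hFij : pvF (pvCells memoria tm) tp (i, j) =
            if tp ≤ j - i then some [i, j - i] else none := by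
          unfold pvF
          by_cases htp : tp ≤ j - i
          · rw [if_pos ⟨hci, htp⟩, if_pos htp]
          · rw [if_neg (fun h => htp h.2), if_neg htp]
        have hrest : pvLoop memoria tm tp j f =
            List.filterMap (pvF (pvCells memoria tm) tp) (pvPairs (pvTB (pvCells memoria tm) tm j)) := by
          have := ih j (by push_cast at hf ⊢; omega) (by omega) hjb.2
            (by
              cases hjstop with
              | inl h => exact Or.inl h
              | inr h => exact Or.inr (Or.inl h))
          exact this
        rw [hFij, hrest, ← ht]
        by_cases htp : tp ≤ j - i
        · rw [if_pos htp, if_pos htp]; rfl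
        · rw [if_neg htp, if_neg htp]; rfl
      · -- non-'-' cell: step to i+1
        have hLoop : pvLoop memoria tm tp i (f + 1) = pvLoop memoria tm tp (i+1) f := by
          simp only [pvLoop]
          rw [if_pos hi, if_neg hdash]
        have hvalid1 : (i+1 = tm ∨ PySem.List.pyGet? memoria (i+1) ≠ some "-" ∨
            pvIsB (pvCells memoria tm) (i+1) = true) := by
          by_cases he : i + 1 = tm
          · exact Or.inl he
          · by_cases hd1 : PySem.List.pyGet? memoria (i+1) = some "-"
            · right; right
              unfold pvIsB
              simp only [Bool.or_eq_true, beq_iff_eq, bne_iff_ne, ne_eq]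
              right
              have hc1 : PySem.List.pyGetD (pvCells memoria tm) (i+1) "" = "-" := by
                have := pvMemGet memoria tm hlen (i+1) (by omega) (by omega)
                rw [hd1] at this
                exact (Option.some_injective _ this.symm)
              have hc0 : PySem.List.pyGetD (pvCells memoria tm) (i+1-1) "" ≠ "-" := by
                have heq : i + 1 - 1 = i := by omega
                rw [heq]
                intro hc
                apply hdash
                rw [pvMemGet memoria tm hlen i h0 hi, hc]
              rw [hc1]
              intro hc
              exact hc0 hc.symm
            · exact Or.inr (Or.inl hd1)
        have hIH := ih (i+1) (by push_cast at hf ⊢; omega) (by omega) (by omega) hvalid1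
        rw [hLoop, hIH]
        by_cases hb : pvIsB (pvCells memoria tm) i = true
        · -- i is a boundary but its pair (i, h) is filtered out (cells[i] ≠ '-')
          obtain ⟨h, t, ht⟩ := pvTB_shape (pvCells memoria tm) tm (i+1)
          have hTB : pvTB (pvCells memoria tm) tm i = i :: h :: t := by
            unfold pvTB
            rw [PySem.List.pyRange_one_cons hi, List.filter_cons, hb]
            simp only [if_pos trivial]
            have : (PySem.List.pyRange (i+1) tm 1).filter (pvIsB (pvCells memoria tm)) ++ [tm] =
                h :: t := ht
            rw [List.cons_append, this]
          rw [hTB, pvPairs_cons, List.filterMap_cons]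
          have hF : pvF (pvCells memoria tm) tp (i, h) = none := by
            unfold pvF
            rw [if_neg]
            intro hc
            apply hdash
            rw [pvMemGet memoria tm hlen i h0 hi, hc.1]
          rw [hF, ← ht]
        · have hTB : pvTB (pvCells memoria tm) tm i = pvTB (pvCells memoria tm) tm (i+1) := by
            unfold pvTB
            rw [PySem.List.pyRange_one_cons hi, List.filter_cons]
            simp only [Bool.not_eq_true] at hb
            rw [hb]
            simp
          rw [hTB]
    · have : i = tm := by omega
      rw [this]
      unfold pvTB
      rw [PySem.List.pyRange_one_eq_nil (le_refl tm), pvLoop_stop memoria tm tp tm (le_refl tm)]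
      simp [pvPairs]

-- ===== VERDICT (by name: the statement is the Claim_ definition above) =====
theorem encontra_slots_livres_spec : Claim_equal_encontra_slots_livres := by
  intro memoria tm tp _ hpre
  unfold Spec_encontra_slots_livres encontra_slots_livres
  have hAlt : encontra_slots_livres_alt memoria tm tp =
      List.filterMap (pvF (pvCells memoria tm) tp)
        (pvPairs (((PySem.List.pyRange 0 (max tm 0) 1).filter (pvIsB (pvCells memoria tm))) ++ [max tm 0])) := by
    show List.filterMap (pvF (pvCells memoria tm) tp)
        (((((PySem.List.pyRange 0 (max tm 0) 1).filter (pvIsB (pvCells memoria tm))) ++ [max tm 0]).zip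
          ((((PySem.List.pyRange 0 (max tm 0) 1).filter (pvIsB (pvCells memoria tm))) ++ [max tm 0]).tail))) = _
    rw [pvZip_eq]
  rw [hAlt]
  by_cases hneg : tm ≤ 0
  · have hmax : max tm 0 = 0 := by omega
    rw [hmax, PySem.List.pyRange_one_eq_nil hneg, PySem.List.pyRange_one_eq_nil (le_refl 0)]
    simp [pvPairs]
  · have hlen : tm ≤ (memoria.length : Int) := by
      cases hpre with
      | inl h => exact h
      | inr h => omega
    have hmax : max tm 0 = tm := by omega
    rw [hmax]
    have hA : ((PySem.List.pyRange 0 tm 1).foldl (pvAStep tm tp memoria) (0, [], 0)).2.1 =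
        pvLoop memoria tm tp 0 tm.toNat := by
      have := pvL memoria tm tp hlen tm.toNat 0 (by omega) (le_refl _) tm.toNat (by omega) [] 0
      simpa using this
    rw [hA]
    have hMain := pvMain memoria tm tp hlen tm.toNat 0 (by omega) (le_refl _) (le_of_lt (by omega))
      (Or.inr (Or.inr (by unfold pvIsB; simp)))
    rw [hMain]
    rfl
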